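-- pv_equiv track=rewrite | github.com/turleyjm/woundHealing | utilBatch.py | surfaceFind
-- ===== SOURCE A (Python) =====
-- def surfaceFind(p):
--
--     n = len(p) - 4
--
--     localMax = []
--     for i in range(n):
--         q = p[i : i + 5]
--         localMax.append(max(q))
--
--     Max = localMax[0]
--     for i in range(n):
--         if Max < localMax[i]:
--             Max = localMax[i]
--         elif Max < 250:
--             continue
--         else:
--             return Max
--
--     return Max
-- ===== SOURCE B (Python) =====
-- def surfaceFind(p):
--     # Sliding-window maximum via the block prefix/suffix-max decomposition:
--     # with blocks of width 5, max(p[i:i+5]) == max(sfx[i], pfx[i+4]), so each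
--     # window max is assembled in O(1) from two auxiliary tables instead of
--     # rescanning a 5-element slice per window.
--     L = len(p)
--     n = L - 4
--
--     pfx = []
--     for j in range(L):
--         pfx.append(p[j] if j % 5 == 0 else max(pfx[-1], p[j]))
--
--     sfx_rev = []
--     for j in range(L - 1, -1, -1):
--         sfx_rev.append(p[j] if (j % 5 == 4 or j == L - 1) else max(sfx_rev[-1], p[j]))
--     sfx = sfx_rev[::-1]
--
--     M = max(sfx[0], pfx[4])
--     for i in range(n):
--         w = max(sfx[i], pfx[i + 4])
--         if w <= M and M >= 250:
--             return M
--         M = max(M, w)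
--     return M
-- ===== Notes on version B (the rewrite author's own statement) =====
-- stated objective: alternative
-- what changed: B replaces A's per-window slice-and-max table with the classic block prefix/suffix-max sliding-window-maximum algorithm: two linear passes build in-block (width 5) prefix-max and suffix-max tables and each window max is assembled in O(1) as max(sfx[i], pfx[i+4]); the scan keeps the running max with a single inverted early-exit guard instead of A's three-way branch.
import Mathlib
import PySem

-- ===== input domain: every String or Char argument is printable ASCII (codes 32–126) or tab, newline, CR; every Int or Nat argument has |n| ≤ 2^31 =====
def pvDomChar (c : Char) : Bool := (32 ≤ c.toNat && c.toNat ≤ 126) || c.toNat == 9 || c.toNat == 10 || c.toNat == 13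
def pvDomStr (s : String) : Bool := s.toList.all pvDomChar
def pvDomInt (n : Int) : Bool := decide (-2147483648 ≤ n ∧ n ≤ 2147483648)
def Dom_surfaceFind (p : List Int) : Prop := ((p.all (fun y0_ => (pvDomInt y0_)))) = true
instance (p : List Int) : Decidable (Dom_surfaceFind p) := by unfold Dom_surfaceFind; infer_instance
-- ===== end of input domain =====

-- B replaces A's per-window slice-and-max with the block prefix/suffix-max sliding-window
-- algorithm (two linear passes build width-5 in-block prefix/suffix maxima; each window max is
-- max(sfx[i], pfx[i+4])); proved equal to A on lists of length ≥ 5 (A raises IndexError below 5).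

-- ===== PORT A =====
-- second loop of A: for i in range(n) over localMax, with early return
def surfaceFindLoopA (localMax : List Int) : List Int → Int → Int
  | [], M => M
  | i :: rest, M =>
    let li := PySem.List.pyGetD localMax i 0  -- i ∈ range(n) is always in range
    if M < li then surfaceFindLoopA localMax rest li
    else if M < 250 then surfaceFindLoopA localMax rest M
    else M

def surfaceFind (p : List Int) : Int :=
  let n : Int := (p.length : Int) - 4
  -- first loop: build localMax; max(q) never sees an empty q for i ∈ range(n)
  let localMax := (PySem.List.pyRange 0 n 1).map
      (fun i => (PySem.List.max? (PySem.List.slice p (some i) (some (i + 5))) (fun x => x)).getD 0)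
  let M0 := PySem.List.pyGetD localMax 0 0  -- localMax[0]: IndexError when n ≤ 0, excluded by Pre_
  surfaceFindLoopA localMax (PySem.List.pyRange 0 n 1) M0

-- ===== PORT B =====
-- pfx: in-block (width 5) running prefix maxima; pfx[-1] is pyGetD acc (-1)
def surfaceFindPfx (p : List Int) : List Int :=
  (PySem.List.pyRange 0 (PySem.List.len p) 1).foldl
    (fun acc j => acc ++ [if PySem.Int.mod j 5 = 0 then PySem.List.pyGetD p j 0
                          else max (PySem.List.pyGetD acc (-1) 0) (PySem.List.pyGetD p j 0)]) []

-- sfx_rev: loop over range(L-1, -1, -1) appending, then sfx = sfx_rev[::-1]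
def surfaceFindSfxRev (p : List Int) : List Int :=
  (PySem.List.pyRange (PySem.List.len p - 1) (-1) (-1)).foldl
    (fun acc j => acc ++ [if PySem.Int.mod j 5 = 4 ∨ j = PySem.List.len p - 1
                          then PySem.List.pyGetD p j 0
                          else max (PySem.List.pyGetD acc (-1) 0) (PySem.List.pyGetD p j 0)]) []

def surfaceFindSfx (p : List Int) : List Int :=
  (PySem.List.slice? (surfaceFindSfxRev p) none none (-1)).getD []

-- the for-loop of B with its single inverted early-exit guard
def surfaceFindLoopB (sfx pfx : List Int) (n : Int) (i : Int) (M : Int) : Int :=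
  if h : i < n then
    let w := max (PySem.List.pyGetD sfx i 0) (PySem.List.pyGetD pfx (i + 4) 0)
    if w ≤ M ∧ 250 ≤ M then M
    else surfaceFindLoopB sfx pfx n (i + 1) (max M w)
  else M
termination_by (n - i).toNat
decreasing_by omega

def surfaceFind_alt (p : List Int) : Int :=
  let n : Int := (p.length : Int) - 4
  let pfx := surfaceFindPfx p
  let sfx := surfaceFindSfx p
  let M0 := max (PySem.List.pyGetD sfx 0 0) (PySem.List.pyGetD pfx 4 0)
  surfaceFindLoopB sfx pfx n 0 M0

-- ===== PRECONDITION & SPEC =====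
-- Pre_ excludes exactly the lists of length < 5, on which A raises (IndexError on localMax[0]).
def Pre_surfaceFind (p : List Int) : Prop := 5 ≤ p.length
instance (p : List Int) : Decidable (Pre_surfaceFind p) := by unfold Pre_surfaceFind; infer_instance
def pvWitness_surfaceFind : List Int := [1, 2, 3, 4, 5]

def Spec_surfaceFind (p : List Int) (out : Int) : Prop := out = surfaceFind_alt p
instance (p : List Int) (out : Int) : Decidable (Spec_surfaceFind p out) := by unfold Spec_surfaceFind; infer_instance

-- ===== CLAIM (what is proved, stated in full; the proofs are below) =====
def Claim_equal_surfaceFind : Prop := ∀ (p : List Int), Dom_surfaceFind p → Pre_surfaceFind p → Spec_surfaceFind p (surfaceFind p)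

-- ===== LEMMAS AND PROOFS =====

-- max of a nonempty list, fold form
def pvLMax (l : List Int) : Int := l.foldl max (l.headD 0)

-- the window p[a..b] as a list (Nat indices)
def pvSeg (p : List Int) (a b : Nat) : List Int := (p.drop a).take (b + 1 - a)

-- in-block prefix maxima, recurrence form
def pvPfxS (p : List Int) : Nat → Int
  | 0 => p.getD 0 0
  | (j+1) => if (j+1) % 5 = 0 then p.getD (j+1) 0 else max (pvPfxS p j) (p.getD (j+1) 0)

-- in-block suffix maxima, recurrence form
def pvSfxS (p : List Int) (j : Nat) : Int :=
  if j % 5 = 4 ∨ p.length ≤ j + 1 then p.getD j 0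
  else max (pvSfxS p (j + 1)) (p.getD j 0)
termination_by p.length - j
decreasing_by simp_all; omega

-- A's window max (max of the slice p[i:i+5])
def pvWin (p : List Int) (i : Int) : Int :=
  (PySem.List.max? (PySem.List.slice p (some i) (some (i + 5))) (fun x => x)).getD 0

lemma pvFoldlMax_swap (l : List Int) (a b : Int) :
    l.foldl max (max a b) = max a (l.foldl max b) := by
  induction l generalizing b with
  | nil => simp
  | cons x t ih => simp only [List.foldl_cons, max_assoc]; exact ih (max b x)

lemma pvLMax_cons (x : Int) (l : List Int) : pvLMax (x :: l) = l.foldl max x := by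
  simp [pvLMax, max_self]

lemma pvLMax_append (u v : List Int) (hu : u ≠ []) (hv : v ≠ []) :
    pvLMax (u ++ v) = max (pvLMax u) (pvLMax v) := by
  obtain ⟨x, t, rfl⟩ := List.exists_cons_of_ne_nil hu
  obtain ⟨y, s, rfl⟩ := List.exists_cons_of_ne_nil hv
  rw [List.cons_append, pvLMax_cons, pvLMax_cons, pvLMax_cons]
  rw [List.foldl_append, List.foldl_cons, pvFoldlMax_swap]

lemma pvLMax_singleton (x : Int) : pvLMax [x] = x := by simp [pvLMax]

lemma pvSeg_len (p : List Int) (a b : Nat) :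
    (pvSeg p a b).length = min (b + 1 - a) (p.length - a) := by
  simp [pvSeg]

lemma pvSeg_ne_nil (p : List Int) (a b : Nat) (hab : a ≤ b) (ha : a < p.length) :
    pvSeg p a b ≠ [] := by
  intro h
  have := pvSeg_len p a b
  rw [h] at this
  simp at this
  omega

lemma pvGetD (p : List Int) (a : Nat) (ha : a < p.length) : p.getD a 0 = p[a] := by
  simp [List.getD_eq_getElem?_getD, List.getElem?_eq_getElem ha]

lemma pvSeg_singleton (p : List Int) (a : Nat) (ha : a < p.length) :
    pvSeg p a a = [p.getD a 0] := by
  unfold pvSeg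
  rw [show a + 1 - a = 1 by omega, List.drop_eq_getElem_cons ha, pvGetD p a ha]
  rfl

lemma pvSeg_cons (p : List Int) (a b : Nat) (hab : a < b) (ha : a < p.length) :
    pvSeg p a b = p.getD a 0 :: pvSeg p (a + 1) b := by
  unfold pvSeg
  rw [List.drop_eq_getElem_cons ha]
  have h1 : b + 1 - a = (b - a) + 1 := by omega
  have h2 : b + 1 - (a + 1) = b - a := by omega
  rw [h1, h2, List.take_succ_cons, pvGetD p a ha]

lemma pvSeg_append_last (p : List Int) (a b : Nat) (hab : a ≤ b) (hb0 : 1 ≤ b) (hb : b < p.length) :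
    pvSeg p a b = pvSeg p a (b - 1) ++ [p.getD b 0] := by
  unfold pvSeg
  have h1 : b + 1 - a = (b - a) + 1 := by omega
  have h2 : (b - 1) + 1 - a = b - a := by omega
  rw [h1, h2, List.take_succ]
  congr 1
  have hg : (p.drop a)[b - a]? = some p[b] := by
    rw [List.getElem?_drop, show a + (b - a) = b by omega, List.getElem?_eq_getElem hb]
  rw [hg, pvGetD p b hb]
  simp

lemma pvSeg_split (p : List Int) (a c b : Nat) (h1 : a ≤ c) (h2 : c < b) :
    pvSeg p a b = pvSeg p a c ++ pvSeg p (c + 1) b := by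
  unfold pvSeg
  have h3 : b + 1 - a = (c + 1 - a) + (b + 1 - (c + 1)) := by omega
  rw [h3, List.take_add, List.drop_drop, show a + (c + 1 - a) = c + 1 by omega]

lemma pvPfxS_eq (p : List Int) (j : Nat) (hj : j < p.length) :
    pvPfxS p j = pvLMax (pvSeg p (5 * (j / 5)) j) := by
  induction j with
  | zero => simp [pvPfxS, pvSeg_singleton p 0 hj, pvLMax_singleton]
  | succ j ih =>
    unfold pvPfxS
    by_cases h5 : (j + 1) % 5 = 0
    · rw [if_pos h5]
      have : 5 * ((j + 1) / 5) = j + 1 := by omega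
      rw [this, pvSeg_singleton p (j+1) hj, pvLMax_singleton]
    · rw [if_neg h5]
      have hdiv : 5 * ((j + 1) / 5) = 5 * (j / 5) := by omega
      have hle : 5 * (j / 5) ≤ j := by omega
      rw [hdiv]
      rw [pvSeg_append_last p _ (j+1) (by omega) (by omega) hj]
      have hsub : j + 1 - 1 = j := by omega
      rw [hsub]
      rw [pvLMax_append _ _ (pvSeg_ne_nil p _ j hle (by omega)) (by simp)]
      rw [ih (by omega), pvLMax_singleton]

lemma pvSfxS_eq_aux (p : List Int) (k : Nat) : ∀ j : Nat, 4 - j % 5 ≤ k →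
    j + (4 - j % 5) + 1 ≤ p.length →
    pvSfxS p j = pvLMax (pvSeg p j (j + (4 - j % 5))) := by
  induction k with
  | zero =>
    intro j hk hlen
    have hr : j % 5 = 4 := by omega
    rw [pvSfxS, if_pos (Or.inl hr)]
    rw [hr]
    simp only [Nat.sub_self, Nat.add_zero]
    rw [pvSeg_singleton p j (by omega), pvLMax_singleton]
  | succ k ih =>
    intro j hk hlen
    by_cases hr : j % 5 = 4
    · rw [pvSfxS, if_pos (Or.inl hr)]
      rw [hr]
      simp only [Nat.sub_self, Nat.add_zero]
      rw [pvSeg_singleton p j (by omega), pvLMax_singleton]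
    · have hr4 : j % 5 < 4 := by omega
      rw [pvSfxS, if_neg (by omega)]
      have hmod : (j + 1) % 5 = j % 5 + 1 := by omega
      have hrec := ih (j + 1) (by omega) (by omega)
      rw [hmod] at hrec
      have he : j + 1 + (4 - (j % 5 + 1)) = j + (4 - j % 5) := by omega
      rw [he] at hrec
      rw [hrec]
      rw [pvSeg_cons p j (j + (4 - j % 5)) (by omega) (by omega)]
      rw [pvLMax_cons]
      have hne := pvSeg_ne_nil p (j+1) (j + (4 - j % 5)) (by omega) (by omega)
      obtain ⟨x, t, hxt⟩ := List.exists_cons_of_ne_nil hne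
      rw [hxt, pvLMax_cons, List.foldl_cons, pvFoldlMax_swap]
      exact max_comm _ _

lemma pvSfxS_eq (p : List Int) (j : Nat) (h : j + (4 - j % 5) + 1 ≤ p.length) :
    pvSfxS p j = pvLMax (pvSeg p j (j + (4 - j % 5))) :=
  pvSfxS_eq_aux p (4 - j % 5) j le_rfl h

-- the block decomposition assembles the window max
lemma pvWinTab_nat (p : List Int) (i : Nat) (h : i + 5 ≤ p.length) :
    max (pvSfxS p i) (pvPfxS p (i + 4)) = pvLMax (pvSeg p i (i + 4)) := by
  by_cases hr : i % 5 = 0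
  · have hs : pvSfxS p i = pvLMax (pvSeg p i (i + 4)) := by
      have := pvSfxS_eq p i (by omega)
      rw [hr] at this
      simpa using this
    have hp : pvPfxS p (i + 4) = pvLMax (pvSeg p i (i + 4)) := by
      have := pvPfxS_eq p (i + 4) (by omega)
      have hd : 5 * ((i + 4) / 5) = i := by omega
      rw [hd] at this
      exact this
    rw [hs, hp, max_self]
  · have hr1 : 1 ≤ i % 5 ∧ i % 5 ≤ 4 := by omega
    have hs : pvSfxS p i = pvLMax (pvSeg p i (i + (4 - i % 5))) := pvSfxS_eq p i (by omega)
    have hp : pvPfxS p (i + 4) = pvLMax (pvSeg p (i + (4 - i % 5) + 1) (i + 4)) := by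
      have := pvPfxS_eq p (i + 4) (by omega)
      have hd : 5 * ((i + 4) / 5) = i + (4 - i % 5) + 1 := by omega
      rw [hd] at this
      exact this
    rw [hs, hp]
    rw [pvSeg_split p i (i + (4 - i % 5)) (i + 4) (by omega) (by omega)]
    rw [pvLMax_append _ _ (pvSeg_ne_nil p _ _ (by omega) (by omega))
        (pvSeg_ne_nil p _ _ (by omega) (by omega))]

-- the pfx fold builds exactly the recurrence table
lemma pvPfx_fold (p : List Int) (m : Nat) (hm : m ≤ p.length) :
    (PySem.List.pyRange 0 (m : Int) 1).foldl
      (fun acc j => acc ++ [if PySem.Int.mod j 5 = 0 then PySem.List.pyGetD p j 0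
                            else max (PySem.List.pyGetD acc (-1) 0) (PySem.List.pyGetD p j 0)]) []
      = (List.range m).map (pvPfxS p) := by
  induction m with
  | zero => simp [PySem.List.pyRange_one_eq_nil]
  | succ m ih =>
    have hc : ((m + 1 : Nat) : Int) = (m : Int) + 1 := by push_cast; ring
    rw [hc, PySem.List.pyRange_one_succ_right (by positivity), List.foldl_append]
    rw [ih (by omega)]
    simp only [List.foldl_cons, List.foldl_nil]
    rw [List.range_succ, List.map_append, List.map_singleton]
    have hmod : PySem.Int.mod (m : Int) 5 = ((m % 5 : Nat) : Int) := by
      exact_mod_cast PySem.Int.mod_natCast m 5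
    have hget : PySem.List.pyGetD p (m : Int) 0 = p.getD m 0 := by simp
    simp only [hmod, hget, Nat.cast_eq_zero]
    congr 1
    congr 1
    by_cases h5 : m % 5 = 0
    · rw [if_pos h5]
      cases m with
      | zero => rfl
      | succ k => rw [pvPfxS, if_pos h5]
    · rw [if_neg h5]
      obtain ⟨k, rfl⟩ := Nat.exists_eq_succ_of_ne_zero (show m ≠ 0 by omega)
      have hlast : PySem.List.pyGetD ((List.range (k + 1)).map (pvPfxS p)) (-1) 0 = pvPfxS p k := by
        rw [List.range_succ, List.map_append, List.map_singleton,
            PySem.List.pyGetD_neg_one_append_singleton]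
      rw [hlast, pvPfxS, if_neg h5]

-- the sfx_rev fold builds the suffix recurrence table, reversed
lemma pvSfx_fold (p : List Int) (m : Nat) (hm : m ≤ p.length) :
    ((List.range m).map (fun (k : Nat) => ((p.length : Int) - 1) - (k : Int))).foldl
      (fun acc j => acc ++ [if PySem.Int.mod j 5 = 4 ∨ j = PySem.List.len p - 1
                            then PySem.List.pyGetD p j 0
                            else max (PySem.List.pyGetD acc (-1) 0) (PySem.List.pyGetD p j 0)]) []
      = (List.range m).map (fun t => pvSfxS p (p.length - 1 - t)) := by
  induction m with
  | zero => simp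
  | succ m ih =>
    rw [List.range_succ, List.map_append, List.map_singleton, List.foldl_append]
    rw [ih (by omega)]
    simp only [List.foldl_cons, List.foldl_nil]
    rw [List.map_append, List.map_singleton]
    set t : Nat := p.length - 1 - m with ht
    have hj : ((p.length : Int) - 1) - ((m : Nat) : Int) = ((t : Nat) : Int) := by omega
    rw [hj]
    have hmod : PySem.Int.mod (t : Int) 5 = ((t % 5 : Nat) : Int) := by
      exact_mod_cast PySem.Int.mod_natCast t 5
    have hget : PySem.List.pyGetD p (t : Int) 0 = p.getD t 0 := by simp
    have hlen : PySem.List.len p = (p.length : Int) := by simp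
    simp only [hmod, hget, hlen]
    congr 1
    congr 1
    have hiff : (((t % 5 : Nat) : Int) = 4 ∨ ((t : Nat) : Int) = (p.length : Int) - 1)
        ↔ (t % 5 = 4 ∨ p.length ≤ t + 1) := by omega
    by_cases hcond : t % 5 = 4 ∨ p.length ≤ t + 1
    · rw [if_pos (hiff.mpr hcond), pvSfxS, if_pos hcond]
    · rw [if_neg (fun hx => hcond (hiff.mp hx)), pvSfxS, if_neg hcond]
      obtain ⟨k, rfl⟩ := Nat.exists_eq_succ_of_ne_zero (show m ≠ 0 by omega)
      have hlast : PySem.List.pyGetD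
          ((List.range (k + 1)).map (fun t' => pvSfxS p (p.length - 1 - t'))) (-1) 0
            = pvSfxS p (p.length - 1 - k) := by
        rw [List.range_succ, List.map_append, List.map_singleton,
            PySem.List.pyGetD_neg_one_append_singleton]
      rw [hlast]
      congr 2
      omega

lemma pvPfx_eq (p : List Int) : surfaceFindPfx p = (List.range p.length).map (pvPfxS p) := by
  unfold surfaceFindPfx
  have hlen : PySem.List.len p = ((p.length : Nat) : Int) := by simp
  rw [hlen]
  exact pvPfx_fold p p.length le_rfl

lemma pvSfx_eq (p : List Int) : surfaceFindSfx p = (List.range p.length).map (pvSfxS p) := by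
  unfold surfaceFindSfx surfaceFindSfxRev
  have hrange : PySem.List.pyRange (PySem.List.len p - 1) (-1) (-1)
      = (List.range p.length).map (fun (k : Nat) => ((p.length : Int) - 1) - (k : Int)) := by
    rw [show PySem.List.len p = (p.length : Int) by simp, PySem.List.pyRange_neg_one,
        show ((p.length : Int) - 1 - -1).toNat = p.length from by omega]
  rw [hrange, pvSfx_fold p p.length le_rfl]
  rw [PySem.List.slice?_none_none_neg_one, Option.getD_some]
  apply List.ext_getElem
  · simp
  · intro j h1 h2
    simp only [List.length_reverse, List.length_map, List.length_range] at h1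
    rw [List.getElem_reverse]
    simp only [List.length_map, List.length_range]
    rw [List.getElem_map, List.getElem_map, List.getElem_range, List.getElem_range]
    congr 1
    omega

-- table reads produce A's window max
lemma pvWinTab (p : List Int) (i : Int) (h0 : 0 ≤ i) (h5 : i + 5 ≤ (p.length : Int)) :
    max (PySem.List.pyGetD (surfaceFindSfx p) i 0)
        (PySem.List.pyGetD (surfaceFindPfx p) (i + 4) 0) = pvWin p i := by
  have hiN : i.toNat + 5 ≤ p.length := by omega
  have hsfx : PySem.List.pyGetD (surfaceFindSfx p) i 0 = pvSfxS p i.toNat := by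
    rw [pvSfx_eq, PySem.List.pyGetD_eq_getElem _ _ h0 (by simp; omega)]
    rw [List.getElem_map, List.getElem_range]
  have hpfx : PySem.List.pyGetD (surfaceFindPfx p) (i + 4) 0 = pvPfxS p (i.toNat + 4) := by
    rw [pvPfx_eq, PySem.List.pyGetD_eq_getElem _ _ (by omega) (by simp; omega)]
    rw [List.getElem_map, List.getElem_range]
    congr 1
    omega
  rw [hsfx, hpfx, pvWinTab_nat p i.toNat hiN]
  -- pvWin as pvLMax of the segment
  unfold pvWin
  rw [PySem.List.slice_toNat p h0 (by omega)]
  have htake : (i + 5).toNat - i.toNat = 5 := by omega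
  rw [htake]
  have hseg : (p.drop i.toNat).take 5 = pvSeg p i.toNat (i.toNat + 4) := by
    unfold pvSeg
    congr 1
    omega
  rw [hseg]
  have hne := pvSeg_ne_nil p i.toNat (i.toNat + 4) (by omega) (by omega)
  obtain ⟨x, t, hxt⟩ := List.exists_cons_of_ne_nil hne
  rw [hxt, PySem.List.max?_id_cons, Option.getD_some, pvLMax_cons]

-- loop equivalence: A's scan over the localMax table = B's scan reading the two tables
lemma pvLoops_eq (p : List Int) (n : Int) (hn : n = (p.length : Int) - 4)
    (i M : Int) (hi : 0 ≤ i) :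
    surfaceFindLoopA ((PySem.List.pyRange 0 n 1).map (pvWin p)) (PySem.List.pyRange i n 1) M
      = surfaceFindLoopB (surfaceFindSfx p) (surfaceFindPfx p) n i M := by
  by_cases h : i < n
  · have hw : max (PySem.List.pyGetD (surfaceFindSfx p) i 0)
        (PySem.List.pyGetD (surfaceFindPfx p) (i + 4) 0) = pvWin p i :=
      pvWinTab p i hi (by omega)
    rw [PySem.List.pyRange_one_cons h]
    rw [surfaceFindLoopA, surfaceFindLoopB]
    simp only [h, dif_pos, hw]
    rw [PySem.List.pyGetD_map_pyRange_of_nonneg (pvWin p) n i 0 hi h]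
    by_cases h1 : M < pvWin p i
    · have h2 : ¬ (pvWin p i ≤ M ∧ 250 ≤ M) := by omega
      rw [if_pos h1, if_neg h2]
      have hmx : max M (pvWin p i) = pvWin p i := by omega
      rw [hmx]
      exact pvLoops_eq p n hn (i + 1) (pvWin p i) (by omega)
    · by_cases h3 : M < 250
      · have h2 : ¬ (pvWin p i ≤ M ∧ 250 ≤ M) := by omega
        rw [if_neg h1, if_pos h3, if_neg h2]
        have hmx : max M (pvWin p i) = M := by omega
        rw [hmx]
        exact pvLoops_eq p n hn (i + 1) M (by omega)
      · have h2 : pvWin p i ≤ M ∧ 250 ≤ M := by omega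
        rw [if_neg h1, if_neg h3, if_pos h2]
  · rw [PySem.List.pyRange_one_eq_nil (show n ≤ i by omega)]
    rw [show surfaceFindLoopA ((PySem.List.pyRange 0 n 1).map (pvWin p)) [] M = M from rfl]
    rw [surfaceFindLoopB]
    simp [h]
termination_by (n - i).toNat
decreasing_by all_goals omega

-- ===== VERDICT (by name: the statement is the Claim_ definition above) =====
theorem surfaceFind_spec : Claim_equal_surfaceFind := by
  intro p _ hpre
  unfold Spec_surfaceFind surfaceFind surfaceFind_alt
  have hlen : (5 : Int) ≤ (p.length : Int) := by exact_mod_cast hpre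
  have h0n : (0 : Int) < (p.length : Int) - 4 := by omega
  simp only [show ∀ i : Int, (PySem.List.max? (PySem.List.slice p (some i) (some (i + 5))) (fun x => x)).getD 0 = pvWin p i from fun _ => rfl]
  have hM0 : PySem.List.pyGetD
      ((PySem.List.pyRange 0 ((p.length : Int) - 4) 1).map (pvWin p)) 0 0 = pvWin p 0 :=
    PySem.List.pyGetD_map_pyRange_of_nonneg (pvWin p) _ 0 0 le_rfl h0n
  rw [hM0]
  have hM0' : max (PySem.List.pyGetD (surfaceFindSfx p) 0 0)
      (PySem.List.pyGetD (surfaceFindPfx p) 4 0) = pvWin p 0 := by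
    have := pvWinTab p 0 le_rfl (by omega)
    simpa using this
  rw [hM0']
  exact pvLoops_eq p ((p.length : Int) - 4) rfl 0 (pvWin p 0) le_rfl
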